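-- pv_equiv track=rewrite | github.com/sudobhuwan/nervaOS | src/ai/pruning.py | _extract_focus_context
-- ===== SOURCE A (Python) =====
-- from typing import List, Dict, Any, Optional
--
-- def _extract_focus_context(
--
--     lines: List[str],
--     focus_lines: List[int],
--     context_before: int = 5,
--     context_after: int = 5
-- ) -> List[str]:
--     """Extract lines around focus points"""
--     result = []
--     included = set()
--
--     for focus in sorted(focus_lines):
--         start = max(0, focus - context_before)
--         end = min(len(lines), focus + context_after + 1)
--
--         # Add separator if there's a gap
--         if result and start > max(included) + 1:
--             result.append(f"... [{start - max(included) - 1} lines omitted] ...")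
--
--         for i in range(start, end):
--             if i not in included:
--                 prefix = ">>> " if i == focus else "    "
--                 result.append(f"{i+1:4d}{prefix}{lines[i]}")
--                 included.add(i)
--
--     return result
-- ===== SOURCE B (Python) =====
-- from typing import List
--
-- def _extract_focus_context(
--     lines: List[str],
--     focus_lines: List[int],
--     context_before: int = 5,
--     context_after: int = 5
-- ) -> List[str]:
--     """Extract lines around focus points (single pass over sorted foci, O(N + F log F))."""
--     result = []
--     last = None  # largest line index emitted so far
--     n = len(lines)
--     for focus in sorted(focus_lines):
--         start = focus - context_before
--         if start < 0:
--             start = 0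
--         end = focus + context_after + 1
--         if end > n:
--             end = n
--         if last is not None and start > last + 1:
--             result.append(f"... [{start - last - 1} lines omitted] ...")
--         lo = start if last is None or start > last else last + 1
--         for i in range(lo, end):
--             prefix = ">>> " if i == focus else "    "
--             result.append(f"{i+1:4d}{prefix}{lines[i]}")
--         if lo < end:
--             last = end - 1
--     return result
-- ===== Notes on version B (the rewrite author's own statement) =====
-- stated objective: faster
-- what changed: B drops A's 'included' set entirely: since the sorted foci give monotone ranges, a single running 'last emitted index' replaces A's per-focus max(included) scan and per-line membership test, so each source line is formatted at most once.
import Mathlib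
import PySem

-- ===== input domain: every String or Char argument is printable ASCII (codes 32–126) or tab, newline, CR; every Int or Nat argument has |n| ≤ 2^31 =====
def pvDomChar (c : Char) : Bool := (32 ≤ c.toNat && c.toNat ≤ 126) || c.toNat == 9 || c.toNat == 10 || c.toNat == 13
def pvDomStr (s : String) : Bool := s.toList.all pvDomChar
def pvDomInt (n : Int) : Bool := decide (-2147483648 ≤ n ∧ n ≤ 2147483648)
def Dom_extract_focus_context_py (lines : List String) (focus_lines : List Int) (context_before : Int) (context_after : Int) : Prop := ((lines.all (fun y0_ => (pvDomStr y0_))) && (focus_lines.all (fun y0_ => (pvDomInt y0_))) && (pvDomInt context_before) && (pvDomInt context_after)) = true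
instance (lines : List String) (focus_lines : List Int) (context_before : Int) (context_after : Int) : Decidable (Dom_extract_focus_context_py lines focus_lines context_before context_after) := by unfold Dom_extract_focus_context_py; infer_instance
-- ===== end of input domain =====

-- B replaces A's per-focus membership set (with its repeated max(included) scans and per-index
-- membership tests) by a single running 'last emitted index', exploiting that the sorted foci
-- yield monotone ranges; same return value, O(N + F log F) instead of O(F·(N+W)).

-- ===== PORT A =====
-- shared rendering of the identical f-strings of Source A and Source B:
-- f"{i+1:4d}{prefix}{lines[i]}" and the "... [k lines omitted] ..." separator
def pvFmt4 (n : Int) : List Char :=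
  List.replicate (4 - (PySem.Int.toChars n).length) ' ' ++ PySem.Int.toChars n

def pvLine (lines : List String) (focus : Int) (i : Int) : String :=
  -- i is always in [0, len lines) at every use, so the pyGetD default "" is never taken
  String.mk (pvFmt4 (i + 1) ++ (if i = focus then ">>> " else "    ").toList
              ++ (PySem.List.pyGetD lines i "").toList)

def pvSep (k : Int) : String :=
  String.mk ("... [".toList ++ PySem.Int.toChars k ++ " lines omitted] ...".toList)

-- body of A's 'for focus in sorted(focus_lines)' loop; state = (result, included)
def pvStepA (lines : List String) (cb ca : Int) (st : List String × PySem.Set Int)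
    (focus : Int) : List String × PySem.Set Int :=
  let start := max 0 (focus - cb)
  let stop := min (lines.length : Int) (focus + ca + 1)
  -- max(included): only evaluated under 'result ≠ []', where included is nonempty
  let st1 := if st.1 ≠ [] ∧ start > ((PySem.List.max? st.2 (fun x => x)).getD 0) + 1 then
      (st.1 ++ [pvSep (start - ((PySem.List.max? st.2 (fun x => x)).getD 0) - 1)], st.2)
    else st
  (PySem.List.pyRange start stop 1).foldl
    (fun st i =>
      if PySem.Set.contains st.2 i then st
      else (st.1 ++ [pvLine lines focus i], PySem.Set.add st.2 i)) st1

def extract_focus_context_py (lines : List String) (focus_lines : List Int)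
    (context_before : Int) (context_after : Int) : List String :=
  ((PySem.List.sorted focus_lines (fun x => x) false).foldl
    (pvStepA lines context_before context_after) ([], PySem.Set.empty)).1

-- ===== PORT B =====
-- body of Source B's loop; state = (result, last)
def pvStepB (lines : List String) (cb ca : Int) (st : List String × Option Int)
    (focus : Int) : List String × Option Int :=
  let s0 := focus - cb
  let start := if s0 < 0 then 0 else s0
  let e0 := focus + ca + 1
  let stop := if e0 > (lines.length : Int) then (lines.length : Int) else e0
  let st1 : List String × Option Int :=
    match st.2 with
    | some l => if start > l + 1 then (st.1 ++ [pvSep (start - l - 1)], st.2) else st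
    | none => st
  let lo : Int :=
    match st.2 with
    | none => start
    | some l => if start > l then start else l + 1
  let res2 := (PySem.List.pyRange lo stop 1).foldl
    (fun r i => r ++ [pvLine lines focus i]) st1.1
  (res2, if lo < stop then some (stop - 1) else st.2)

def extract_focus_context_py_alt (lines : List String) (focus_lines : List Int)
    (context_before : Int) (context_after : Int) : List String :=
  ((PySem.List.sorted focus_lines (fun x => x) false).foldl
    (pvStepB lines context_before context_after) ([], none)).1

-- ===== PRECONDITION & SPEC =====
def Spec_extract_focus_context_py (lines : List String) (focus_lines : List Int) (context_before : Int) (context_after : Int) (out : List String) : Prop := out = extract_focus_context_py_alt lines focus_lines context_before context_after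
instance (lines : List String) (focus_lines : List Int) (context_before : Int) (context_after : Int) (out : List String) : Decidable (Spec_extract_focus_context_py lines focus_lines context_before context_after out) := by unfold Spec_extract_focus_context_py; infer_instance

-- ===== CLAIM (what is proved, stated in full; the proofs are below) =====
def Claim_equal_extract_focus_context_py : Prop := ∀ (lines : List String) (focus_lines : List Int) (context_before : Int) (context_after : Int), Dom_extract_focus_context_py lines focus_lines context_before context_after → Spec_extract_focus_context_py lines focus_lines context_before context_after (extract_focus_context_py lines focus_lines context_before context_after)

-- ===== LEMMAS AND PROOFS =====

-- Invariant tying A's 'included' set to B's 'last': S is a lower bound on every future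
-- range start; below last the set is solid from S up, and last is its maximum.
def pvInv (inc : PySem.Set Int) (last : Option Int) (S : Int) : Prop :=
  match last with
  | none => ∀ i : Int, i ∉ inc
  | some l => (∀ i ∈ inc, i ≤ l) ∧ (∀ i : Int, S ≤ i → i ≤ l → i ∈ inc) ∧ l ∈ inc

-- A's inner loop over range(j, stop): if membership in inc is exactly '≤ L' from j upward,
-- it emits the lines of [max j (L+1), stop) and ends with inc ∪ [j, stop).
theorem pv_innerA (lines : List String) (focus L : Int) :
    ∀ (k : Nat) (j stop : Int) (res : List String) (inc : PySem.Set Int),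
      (stop - j).toNat = k →
      (∀ i : Int, j ≤ i → (i ∈ inc ↔ i ≤ L)) →
      ((PySem.List.pyRange j stop 1).foldl
          (fun st i =>
            if PySem.Set.contains st.2 i then st
            else (st.1 ++ [pvLine lines focus i], PySem.Set.add st.2 i)) (res, inc)).1
        = res ++ (PySem.List.pyRange (max j (L + 1)) stop 1).map (pvLine lines focus) ∧
      (∀ i : Int,
        i ∈ ((PySem.List.pyRange j stop 1).foldl
          (fun st i =>
            if PySem.Set.contains st.2 i then st
            else (st.1 ++ [pvLine lines focus i], PySem.Set.add st.2 i)) (res, inc)).2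
          ↔ i ∈ inc ∨ (j ≤ i ∧ i < stop)) := by
  intro k
  induction k with
  | zero =>
    intro j stop res inc hk hmem
    have hle : stop ≤ j := by omega
    rw [PySem.List.pyRange_one_eq_nil hle,
      PySem.List.pyRange_one_eq_nil (le_trans hle (le_max_left j (L + 1)))]
    simp only [List.foldl_nil, List.map_nil, List.append_nil]
    constructor
    · trivial
    · intro i
      constructor
      · exact fun h => Or.inl h
      · rintro (h | h)
        · exact h
        · omega
  | succ k ih =>
    intro j stop res inc hk hmem
    have hlt : j < stop := by omega
    rw [PySem.List.pyRange_one_cons hlt]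
    simp only [List.foldl_cons]
    by_cases hj : j ∈ inc
    · have hjL : j ≤ L := (hmem j le_rfl).mp hj
      have hc : PySem.Set.contains inc j = true := (PySem.Set.contains_iff inc j).mpr hj
      rw [if_pos hc]
      have hmem' : ∀ i : Int, j + 1 ≤ i → (i ∈ inc ↔ i ≤ L) := fun i hi => hmem i (by omega)
      obtain ⟨h1, h2⟩ := ih (j + 1) stop res inc (by omega) hmem'
      refine ⟨?_, ?_⟩
      · rw [h1, max_eq_right (by omega : j ≤ L + 1), max_eq_right (by omega : j + 1 ≤ L + 1)]
      · intro i
        rw [h2 i]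
        constructor
        · rintro (h | h); · exact Or.inl h
          · exact Or.inr ⟨by omega, h.2⟩
        · rintro (h | h); · exact Or.inl h
          · rcases eq_or_lt_of_le h.1 with rfl | hlt2
            · exact Or.inl hj
            · exact Or.inr ⟨by omega, h.2⟩
    · have hjL : ¬ j ≤ L := fun h => hj ((hmem j le_rfl).mpr h)
      have hc : ¬ PySem.Set.contains inc j = true := by
        rw [PySem.Set.contains_iff inc j]; exact hj
      rw [if_neg hc]
      have hmem' : ∀ i : Int, j + 1 ≤ i → (i ∈ PySem.Set.add inc j ↔ i ≤ L) := by
        intro i hi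
        rw [PySem.Set.mem_add]
        constructor
        · rintro (h | rfl); · exact (hmem i (by omega)).mp h
          · omega
        · intro h; exact Or.inl ((hmem i (by omega)).mpr h)
      obtain ⟨h1, h2⟩ := ih (j + 1) stop (res ++ [pvLine lines focus j]) (PySem.Set.add inc j)
        (by omega) hmem'
      refine ⟨?_, ?_⟩
      · rw [h1]
        have hmj : max j (L + 1) = j := max_eq_left (by omega)
        have hmj1 : max (j + 1) (L + 1) = j + 1 := max_eq_left (by omega)
        rw [hmj, hmj1, PySem.List.pyRange_one_cons hlt]
        simp
      · intro i
        rw [h2 i, PySem.Set.mem_add]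
        constructor
        · rintro ((h | rfl) | h)
          · exact Or.inl h
          · exact Or.inr ⟨le_rfl, hlt⟩
          · exact Or.inr ⟨by omega, h.2⟩
        · rintro (h | h)
          · exact Or.inl (Or.inl h)
          · rcases eq_or_lt_of_le h.1 with rfl | hlt2
            · exact Or.inl (Or.inr rfl)
            · exact Or.inr ⟨by omega, h.2⟩

-- the main loop invariant: A's fold and B's fold produce the same result list
theorem pv_loop_eq (lines : List String) (cb ca : Int) :
    ∀ (fs : List Int) (res : List String) (inc : PySem.Set Int) (last : Option Int) (S : Int),
      fs.Pairwise (· ≤ ·) →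
      (∀ f ∈ fs, S ≤ max 0 (f - cb)) →
      pvInv inc last S →
      (res = [] ↔ last = none) →
      (fs.foldl (pvStepA lines cb ca) (res, inc)).1
        = (fs.foldl (pvStepB lines cb ca) (res, last)).1 := by
  intro fs
  induction fs with
  | nil => intro res inc last S _ _ _ _; rfl
  | cons f rest ih =>
    intro res inc last S hpw hS hinv hres
    simp only [List.foldl_cons]
    set start := max 0 (f - cb) with hstart
    set stop := min (lines.length : Int) (f + ca + 1) with hstop
    have hSstart : S ≤ start := hS f (List.mem_cons_self ..)
    have hpw' : rest.Pairwise (· ≤ ·) := hpw.of_cons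
    have hmono : ∀ f' ∈ rest, f ≤ f' := fun f' hf' => (List.pairwise_cons.mp hpw).1 f' hf'
    have hS' : ∀ f' ∈ rest, max S start ≤ max 0 (f' - cb) := by
      intro f' hf'
      refine max_le (hS f' (List.mem_cons_of_mem _ hf')) ?_
      rw [hstart]
      exact max_le (le_max_left _ _)
        (le_trans (by have := hmono f' hf'; omega) (le_max_right 0 (f' - cb)))
    -- B's start/stop normalisation
    have hBstart : (if f - cb < 0 then 0 else f - cb) = start := by
      rw [hstart, max_def]; split_ifs <;> omega
    have hBstop : (if f + ca + 1 > (lines.length : Int) then (lines.length : Int) else f + ca + 1) = stop := by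
      rw [hstop, min_def]; split_ifs <;> omega
    cases last with
    | none =>
      have hinc : ∀ i : Int, i ∉ inc := hinv
      have hresnil : res = [] := hres.mpr rfl
      -- A's separator test fails (result is empty)
      have hA1 : pvStepA lines cb ca (res, inc) f
          = (PySem.List.pyRange start stop 1).foldl
              (fun st i =>
                if PySem.Set.contains st.2 i then st
                else (st.1 ++ [pvLine lines f i], PySem.Set.add st.2 i)) (res, inc) := by
        simp only [pvStepA, hresnil]
        rw [if_neg (by simp)]
      obtain ⟨hA2, hA3⟩ := pv_innerA lines f (start - 1) (stop - start).toNat start stop res inc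
        rfl (by intro i hi; simp only [hinc i, false_iff]; omega)
      have hA2' : ((PySem.List.pyRange start stop 1).foldl
              (fun st i =>
                if PySem.Set.contains st.2 i then st
                else (st.1 ++ [pvLine lines f i], PySem.Set.add st.2 i)) (res, inc)).1
          = res ++ (PySem.List.pyRange start stop 1).map (pvLine lines f) := by
        rw [hA2]
        have h4 : start - 1 + 1 = start := by omega
        rw [h4, max_self]
      have hApair : pvStepA lines cb ca (res, inc) f
          = (res ++ (PySem.List.pyRange start stop 1).map (pvLine lines f),
             ((PySem.List.pyRange start stop 1).foldl
              (fun st i =>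
                if PySem.Set.contains st.2 i then st
                else (st.1 ++ [pvLine lines f i], PySem.Set.add st.2 i)) (res, inc)).2) := by
        rw [hA1]; exact Prod.ext hA2' rfl
      have hB1 : pvStepB lines cb ca (res, none) f
          = (res ++ (PySem.List.pyRange start stop 1).map (pvLine lines f),
             if start < stop then some (stop - 1) else none) := by
        simp only [pvStepB, hBstart, hBstop, PySem.List.foldl_append_singleton_eq_map]
      rw [hApair, hB1]
      by_cases hnonempty : start < stop
      · rw [if_pos hnonempty]
        apply ih _ _ _ (max S start) hpw' hS'
        · -- invariant for some (stop - 1)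
          refine ⟨?_, ?_, ?_⟩
          · intro i hi
            rcases (hA3 i).mp hi with h | h
            · exact absurd h (hinc i)
            · omega
          · intro i h1 h2
            have h1' : start ≤ i := le_trans (le_max_right S start) h1
            exact (hA3 i).mpr (Or.inr ⟨by omega, by omega⟩)
          · exact (hA3 (stop - 1)).mpr (Or.inr ⟨by omega, by omega⟩)
        · constructor
          · intro h
            rw [PySem.List.pyRange_one_cons hnonempty] at h
            simp at h
          · intro h; exact absurd h (by simp)
      · rw [if_neg hnonempty]
        have hrange : PySem.List.pyRange start stop 1 = [] :=
          PySem.List.pyRange_one_eq_nil (by omega)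
        apply ih _ _ _ (max S start) hpw' hS'
        · intro i hi
          rcases (hA3 i).mp hi with h | h
          · exact hinc i h
          · omega
        · rw [hrange]
          simpa using hres
    | some l =>
      have hresne : res ≠ [] := by
        intro h; exact absurd (hres.mp h) (by simp)
      obtain ⟨hub, hsolid, hlmem⟩ := hinv
      -- max(included) = l
      have hmax : ((PySem.List.max? inc (fun x => x)).getD 0) = l := by
        cases hm : PySem.List.max? inc (fun x => x) with
        | none =>
          exact absurd ((PySem.List.max?_eq_none_iff inc (fun x => x)).mp hm) (by
            intro h; rw [h] at hlmem; exact absurd hlmem List.not_mem_nil)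
        | some m =>
          have hm1 : m ∈ inc := PySem.List.max?_mem hm
          have hm2 : l ≤ m := PySem.List.max?_isMax hm l hlmem
          have hm3 : m ≤ l := hub m hm1
          simp only [Option.getD_some]; omega
      set res1 := if start > l + 1 then res ++ [pvSep (start - l - 1)] else res with hres1
      have hA1 : pvStepA lines cb ca (res, inc) f
          = (PySem.List.pyRange start stop 1).foldl
              (fun st i =>
                if PySem.Set.contains st.2 i then st
                else (st.1 ++ [pvLine lines f i], PySem.Set.add st.2 i)) (res1, inc) := by
        simp only [pvStepA, hmax]
        by_cases hsep : start > l + 1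
        · rw [if_pos ⟨hresne, hsep⟩, hres1, if_pos hsep]
        · rw [if_neg (by tauto), hres1, if_neg hsep]
      set lo : Int := if start > l then start else l + 1 with hlo
      have hlomax : max start (l + 1) = lo := by
        rw [hlo, max_def]; split_ifs <;> omega
      obtain ⟨hA2, hA3⟩ := pv_innerA lines f l (stop - start).toNat start stop res1 inc
        rfl (by
          intro i hi
          constructor
          · exact fun h => hub i h
          · exact fun h => hsolid i (by omega) h)
      have hA2' : ((PySem.List.pyRange start stop 1).foldl
              (fun st i =>
                if PySem.Set.contains st.2 i then st
                else (st.1 ++ [pvLine lines f i], PySem.Set.add st.2 i)) (res1, inc)).1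
          = res1 ++ (PySem.List.pyRange lo stop 1).map (pvLine lines f) := by
        rw [hA2, hlomax]
      have hApair : pvStepA lines cb ca (res, inc) f
          = (res1 ++ (PySem.List.pyRange lo stop 1).map (pvLine lines f),
             ((PySem.List.pyRange start stop 1).foldl
              (fun st i =>
                if PySem.Set.contains st.2 i then st
                else (st.1 ++ [pvLine lines f i], PySem.Set.add st.2 i)) (res1, inc)).2) := by
        rw [hA1]; exact Prod.ext hA2' rfl
      have hB1 : pvStepB lines cb ca (res, some l) f
          = (res1 ++ (PySem.List.pyRange lo stop 1).map (pvLine lines f),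
             if lo < stop then some (stop - 1) else some l) := by
        simp only [pvStepB, hBstart, hBstop, PySem.List.foldl_append_singleton_eq_map]
        by_cases hsep : start > l + 1
        · rw [hres1, if_pos hsep, if_pos hsep]
        · rw [hres1, if_neg hsep, if_neg hsep]
      rw [hApair, hB1]
      have hres1ne : res1 ≠ [] := by
        rw [hres1]; split_ifs
        · simp
        · exact hresne
      have hlol : l + 1 ≤ lo := by rw [hlo]; split_ifs <;> omega
      have hlos : start ≤ lo := by rw [hlo]; split_ifs <;> omega
      by_cases hem : lo < stop
      · rw [if_pos hem]
        apply ih _ _ _ (max S start) hpw' hS'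
        · refine ⟨?_, ?_, ?_⟩
          · intro i hi
            rcases (hA3 i).mp hi with h | h
            · have := hub i h; omega
            · omega
          · intro i h1 h2
            have h1' : start ≤ i := le_trans (le_max_right S start) h1
            exact (hA3 i).mpr (Or.inr ⟨by omega, by omega⟩)
          · exact (hA3 (stop - 1)).mpr (Or.inr ⟨by omega, by omega⟩)
        · constructor
          · intro h; simp at h; exact absurd h.1 hres1ne
          · intro h; exact absurd h (by simp)
      · rw [if_neg hem]
        apply ih _ _ _ (max S start) hpw' hS'
        · refine ⟨?_, ?_, ?_⟩
          · intro i hi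
            rcases (hA3 i).mp hi with h | h
            · exact hub i h
            · omega
          · intro i h1 h2
            have h1' : S ≤ i := le_trans (le_max_left S start) h1
            exact (hA3 i).mpr (Or.inl (hsolid i (by omega) h2))
          · exact (hA3 l).mpr (Or.inl hlmem)
        · constructor
          · intro h; simp at h; exact absurd h.1 hres1ne
          · intro h; exact absurd h (by simp)

-- ===== VERDICT (by name: the statement is the Claim_ definition above) =====
theorem extract_focus_context_py_spec : Claim_equal_extract_focus_context_py := by
  intro lines focus_lines cb ca _
  unfold Spec_extract_focus_context_py extract_focus_context_py extract_focus_context_py_alt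
  apply pv_loop_eq lines cb ca _ [] PySem.Set.empty none 0
  · have := PySem.List.sorted_pairwise focus_lines (fun x => x)
    exact this
  · intro f _; omega
  · intro i h; exact absurd h (List.not_mem_nil)
  · simp
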